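-- pv_equiv track=rewrite | github.com/pivodatamas/aoc_2021 | 12_2/main.py | checkIfSmallTwice
-- ===== SOURCE A (Python) =====
-- def checkIfSmallTwice(path):
--     path_node_list = path.split(',')
--     path_node_set = set()
--     for node in path_node_list:
--         if node in path_node_set and node.islower():
--             return True
--         path_node_set.add(node)
--     return False
-- ===== SOURCE B (Python) =====
-- def checkIfSmallTwice(path):
--     nodes = sorted(path.split(','))
--     return any(a == b and a.islower() for a, b in zip(nodes, nodes[1:]))
-- ===== Notes on version B (the rewrite author's own statement) =====
-- stated objective: alternative
-- what changed: Replaces A's hash-set membership scan with a sort-based algorithm: sort the node list so equal nodes become adjacent, then scan consecutive pairs for an equal lowercase pair; no set or table is used.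
import Mathlib
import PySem

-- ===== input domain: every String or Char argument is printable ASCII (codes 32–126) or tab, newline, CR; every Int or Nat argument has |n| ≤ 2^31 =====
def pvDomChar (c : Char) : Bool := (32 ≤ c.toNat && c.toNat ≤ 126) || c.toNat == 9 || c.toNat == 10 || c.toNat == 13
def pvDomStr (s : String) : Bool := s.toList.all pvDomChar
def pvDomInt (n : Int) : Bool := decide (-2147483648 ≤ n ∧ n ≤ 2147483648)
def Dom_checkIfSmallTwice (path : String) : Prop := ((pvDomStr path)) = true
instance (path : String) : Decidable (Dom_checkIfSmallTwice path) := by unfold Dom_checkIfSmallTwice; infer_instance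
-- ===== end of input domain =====

-- B replaces A's seen-set membership scan by a sort-based algorithm: sort the split
-- nodes so equal ones become adjacent, then scan consecutive pairs for an equal
-- lowercase pair; same return value everywhere.

-- shared helper: Python str.islower() — at least one lowercase letter and no uppercase
-- letter; exact on the ASCII domain (where cased characters are exactly the letters)
def pyStrIslower (s : String) : Bool :=
  s.toList.any (fun c => PySem.Chars.islower c) && s.toList.all (fun c => !PySem.Chars.isupper c)

-- ===== PORT A =====
def checkIfSmallTwiceGo (seen : PySem.Set String) : List String → Bool
  | [] => false
  | node :: rest =>
    if PySem.Set.contains seen node && pyStrIslower node then true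
    else checkIfSmallTwiceGo (PySem.Set.add seen node) rest

def checkIfSmallTwice (path : String) : Bool :=
  checkIfSmallTwiceGo PySem.Set.empty ((PySem.Str.split? path ",").getD [])

-- ===== PORT B =====
def checkIfSmallTwice_alt (path : String) : Bool :=
  let nodes := PySem.List.sorted ((PySem.Str.split? path ",").getD []) (fun x => x) false
  (nodes.zip nodes.tail).any (fun p => p.1 == p.2 && pyStrIslower p.1)

-- ===== PRECONDITION & SPEC =====
def Spec_checkIfSmallTwice (path : String) (out : Bool) : Prop := out = checkIfSmallTwice_alt path
instance (path : String) (out : Bool) : Decidable (Spec_checkIfSmallTwice path out) := by unfold Spec_checkIfSmallTwice; infer_instance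

-- ===== CLAIM (what is proved, stated in full; the proofs are below) =====
def Claim_equal_checkIfSmallTwice : Prop := ∀ (path : String), Dom_checkIfSmallTwice path → Spec_checkIfSmallTwice path (checkIfSmallTwice path)

-- ===== LEMMAS AND PROOFS =====

-- A's scan returns true iff some lowercase node has at least two occurrences
lemma goA_iff (l : List String) : ∀ (seen : PySem.Set String),
    (checkIfSmallTwiceGo seen l = true ↔
      ∃ n ∈ l, pyStrIslower n = true ∧ (n ∈ seen ∨ 2 ≤ l.count n)) := by
  induction l with
  | nil => intro seen; simp [checkIfSmallTwiceGo]
  | cons x rest ih =>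
    intro seen
    simp only [checkIfSmallTwiceGo]
    by_cases hx : (PySem.Set.contains seen x && pyStrIslower x) = true
    · simp only [hx, if_true, true_iff]
      rw [Bool.and_eq_true, PySem.Set.contains_iff] at hx
      exact ⟨x, List.mem_cons_self, hx.2, Or.inl hx.1⟩
    · rw [if_neg hx, ih]
      rw [Bool.and_eq_true, PySem.Set.contains_iff] at hx
      constructor
      · rintro ⟨n, hn, hl, hmem | hc⟩
        · rcases (PySem.Set.mem_add _ _ _).mp hmem with h | rfl
          · exact ⟨n, List.mem_cons_of_mem _ hn, hl, Or.inl h⟩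
          · refine ⟨n, List.mem_cons_of_mem _ hn, hl, Or.inr ?_⟩
            have h1 : 1 ≤ rest.count n := List.count_pos_iff.mpr hn
            simp only [List.count_cons, beq_self_eq_true, if_true]
            omega
        · refine ⟨n, List.mem_cons_of_mem _ hn, hl, Or.inr ?_⟩
          simp only [List.count_cons]
          omega
      · rintro ⟨n, hn, hl, hmem | hc⟩
        · rcases List.mem_cons.mp hn with rfl | hn'
          · exact absurd ⟨hmem, hl⟩ hx
          · exact ⟨n, hn', hl, Or.inl ((PySem.Set.mem_add _ _ _).mpr (Or.inl hmem))⟩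
        · by_cases hne : n = x
          · subst hne
            simp only [List.count_cons, if_pos (beq_self_eq_true n)] at hc
            have h1 : 1 ≤ rest.count n := by omega
            exact ⟨n, List.count_pos_iff.mp h1, hl,
              Or.inl ((PySem.Set.mem_add _ _ _).mpr (Or.inr rfl))⟩
          · rcases List.mem_cons.mp hn with rfl | hn'
            · exact absurd rfl hne
            · refine ⟨n, hn', hl, Or.inr ?_⟩
              simp only [List.count_cons] at hc
              split_ifs at hc with h
              · exact absurd (beq_iff_eq.mp h).symm hne
              · omega

-- on a ≤-sorted list, an adjacent equal pair passing f is exactly a duplicate passing f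
lemma adj_iff (s : List String) (hs : s.Pairwise (· ≤ ·)) :
    ((s.zip s.tail).any (fun p => p.1 == p.2 && pyStrIslower p.1) = true ↔
      ∃ n, pyStrIslower n = true ∧ 2 ≤ s.count n) := by
  induction s with
  | nil => simp
  | cons a t ih =>
    cases t with
    | nil =>
      simp only [List.zip, List.tail_cons, List.zipWith_nil_right, List.any_nil]
      refine ⟨fun h => absurd h Bool.false_ne_true, ?_⟩
      rintro ⟨n, _, hc⟩
      have := List.count_le_length (l := [a]) (a := n)
      simp at this; omega
    | cons b r =>
      obtain ⟨hhead, hpair⟩ := List.pairwise_cons.mp hs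
      have ih' := ih hpair
      have hab : a ≤ b := hhead b List.mem_cons_self
      have hbr : ∀ x ∈ r, b ≤ x := fun x hx => (List.pairwise_cons.mp hpair).1 x hx
      simp only [List.tail_cons, List.zip_cons_cons, List.any_cons] at *
      rw [Bool.or_eq_true, ih']
      constructor
      · rintro (hpq | ⟨n, hl, hc⟩)
        · rw [Bool.and_eq_true, beq_iff_eq] at hpq
          refine ⟨a, hpq.2, ?_⟩
          rw [List.count_cons, List.count_cons, ← hpq.1]
          simp only [beq_self_eq_true, if_true]
          omega
        · exact ⟨n, hl, le_trans hc (List.Sublist.count_le n (List.sublist_cons_self a _))⟩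
      · rintro ⟨n, hl, hc⟩
        by_cases h2 : 2 ≤ (b :: r).count n
        · exact Or.inr ⟨n, hl, h2⟩
        · rw [List.count_cons] at hc
          simp only [beq_iff_eq] at hc
          split_ifs at hc with han
          · have hna : n = a := han.symm
            subst hna
            have h1 : 1 ≤ (b :: r).count n := by omega
            have hmem : n ∈ b :: r := List.count_pos_iff.mp h1
            have hbn : b ≤ n := by
              rcases List.mem_cons.mp hmem with rfl | h
              · exact le_refl _
              · exact hbr _ h
            left
            rw [Bool.and_eq_true, beq_iff_eq]
            exact ⟨le_antisymm hab hbn, hl⟩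
          · exact absurd (by omega : 2 ≤ (b :: r).count n) h2

-- ===== VERDICT (by name: the statement is the Claim_ definition above) =====
theorem checkIfSmallTwice_spec : Claim_equal_checkIfSmallTwice := by
  intro path _
  unfold Spec_checkIfSmallTwice checkIfSmallTwice checkIfSmallTwice_alt
  set l := (PySem.Str.split? path ",").getD [] with hl
  rw [Bool.eq_iff_iff, goA_iff]
  rw [adj_iff _ (by simpa using PySem.List.sorted_pairwise l (fun x => x))]
  have hperm := PySem.List.sorted_perm l (fun x => x) false
  constructor
  · rintro ⟨n, hn, hlo, hmem | hc⟩
    · simp [PySem.Set.empty] at hmem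
    · exact ⟨n, hlo, by rw [hperm.count_eq]; exact hc⟩
  · rintro ⟨n, hlo, hc⟩
    rw [hperm.count_eq] at hc
    exact ⟨n, List.count_pos_iff.mp (by omega), hlo, Or.inr hc⟩
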